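-- pv_equiv track=rewrite | github.com/rracygnus/klasfikasi_hs | Preprocessing.py | tokenization_with_context
-- ===== SOURCE A (Python) =====
-- important_words = [
--     'tidak', 'kurang', 'bukan', 'tak', 'tidak_sopan', 'kurang_ajar'  # Kata negasi
--     'namun', 'tetapi', 'meski', 'walaupun',  # Kata penghubung
--     'sangat', 'amat', 'paling',  # Kata penguat
--     'buruk', 'jelek', 'hina', 'kasar', 'jahat',  # Kata evaluasi negatif
--     'dong', 'nih', 'ya', 'aja' , 'jangan' # Kata gaul
-- ]
--
-- def tokenization_with_context(text):
--     tokens = text.split()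
--     processed_tokens = []
--     skip_next = False
--     for i, token in enumerate(tokens):
--         if skip_next:
--             skip_next = False
--             continue
--         if token in important_words and i < len(tokens) - 1:
--             combined_word = f"{token}_{tokens[i + 1]}"
--             processed_tokens.append(combined_word)
--             skip_next = True
--         else:
--             processed_tokens.append(token)
--     return processed_tokens
-- ===== SOURCE B (Python) =====
-- important_words = [
--     'tidak', 'kurang', 'bukan', 'tak', 'tidak_sopan', 'kurang_ajar'  # Kata negasi
--     'namun', 'tetapi', 'meski', 'walaupun',  # Kata penghubung
--     'sangat', 'amat', 'paling',  # Kata penguat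
--     'buruk', 'jelek', 'hina', 'kasar', 'jahat',  # Kata evaluasi negatif
--     'dong', 'nih', 'ya', 'aja' , 'jangan' # Kata gaul
-- ]
--
-- _IMPORTANT = frozenset(important_words)
--
-- def tokenization_with_context(text):
--     # Consume the token stream with an iterator: an important word eats the
--     # next token from the stream itself, so no index and no skip flag needed.
--     out = []
--     it = iter(text.split())
--     for token in it:
--         if token in _IMPORTANT:
--             nxt = next(it, None)
--             if nxt is None:
--                 out.append(token)
--             else:
--                 out.append(f"{token}_{nxt}")
--         else:
--             out.append(token)
--     return out
-- ===== Notes on version B (the rewrite author's own statement) =====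
-- stated objective: idiomatic
-- what changed: B consumes the token stream with an iterator that pulls the lookahead token via next(it, None) and tests membership in a frozenset, eliminating the enumerate index, the i<len-1 bound check and the skip_next flag of A.
import Mathlib
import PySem

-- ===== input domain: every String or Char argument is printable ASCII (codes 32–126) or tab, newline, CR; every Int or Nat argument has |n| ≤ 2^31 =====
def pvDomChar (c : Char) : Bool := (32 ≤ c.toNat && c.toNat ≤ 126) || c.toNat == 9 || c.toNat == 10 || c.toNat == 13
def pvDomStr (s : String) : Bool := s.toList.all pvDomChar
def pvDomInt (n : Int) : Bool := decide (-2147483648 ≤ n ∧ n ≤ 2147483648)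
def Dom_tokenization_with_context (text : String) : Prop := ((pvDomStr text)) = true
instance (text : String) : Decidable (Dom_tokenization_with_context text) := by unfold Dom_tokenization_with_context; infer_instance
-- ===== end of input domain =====

-- B replaces A's enumerate + skip_next flag by an iterator that pulls the lookahead token
-- from the stream itself (idiomatic; same O(n) cost).

-- the module constant, verbatim (including the missing-comma concatenation 'kurang_ajarnamun')
def important_words : List String :=
  ["tidak", "kurang", "bukan", "tak", "tidak_sopan", "kurang_ajarnamun",
   "tetapi", "meski", "walaupun", "sangat", "amat", "paling",
   "buruk", "jelek", "hina", "kasar", "jahat", "dong", "nih", "ya", "aja", "jangan"]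

-- ===== PORT A =====
-- A's for-loop over enumerate(tokens) with state (processed_tokens, skip_next)
def tokA_loop (tokens : List String) : List (Int × String) → List String → Bool → List String
  | [], acc, _ => acc
  | (i, token) :: rest, acc, skip =>
    if skip then tokA_loop tokens rest acc false
    else if token ∈ important_words ∧ i < (tokens.length : Int) - 1 then
      let combined := token ++ "_" ++ (PySem.List.pyGet? tokens (i + 1)).getD ""
      tokA_loop tokens rest (acc ++ [combined]) true
    else tokA_loop tokens rest (acc ++ [token]) false

def tokenization_with_context (text : String) : List String :=
  let tokens := PySem.Str.split₀ text
  tokA_loop tokens (PySem.List.enumerate tokens 0) [] false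

-- ===== PORT B =====
def important_set : List String := PySem.Set.ofList important_words

-- B's iterator loop: an important word consumes the next token from the stream
def tokB_go : List String → List String
  | [] => []
  | token :: rest =>
    if token ∈ important_set then
      match rest with
      | [] => [token]
      | nxt :: rest' => (token ++ "_" ++ nxt) :: tokB_go rest'
    else token :: tokB_go rest

def tokenization_with_context_alt (text : String) : List String :=
  tokB_go (PySem.Str.split₀ text)

-- ===== PRECONDITION & SPEC =====
def Spec_tokenization_with_context (text : String) (out : List String) : Prop := out = tokenization_with_context_alt text
instance (text : String) (out : List String) : Decidable (Spec_tokenization_with_context text out) := by unfold Spec_tokenization_with_context; infer_instance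

-- ===== CLAIM (what is proved, stated in full; the proofs are below) =====
def Claim_equal_tokenization_with_context : Prop := ∀ (text : String), Dom_tokenization_with_context text → Spec_tokenization_with_context text (tokenization_with_context text)

-- ===== LEMMAS AND PROOFS =====

theorem mem_important_set (t : String) : t ∈ important_set ↔ t ∈ important_words := by
  simp [important_set]

theorem tokB_go_cons_not (t : String) (rest : List String) (h : t ∉ important_set) :
    tokB_go (t :: rest) = t :: tokB_go rest := by
  cases rest <;> simp [tokB_go, h]

theorem tokA_loop_eq_aux (ts : List String) :
    ∀ (n : Nat) (suf : List String), suf.length ≤ n → ∀ (i : Nat) (acc : List String), ts.drop i = suf →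
      tokA_loop ts (PySem.List.enumerate suf (i : Int)) acc false = acc ++ tokB_go suf := by
  intro n
  induction n with
  | zero =>
    intro suf hle i acc hdrop
    have : suf = [] := by cases suf <;> simp_all
    subst this
    simp [PySem.List.enumerate_nil, tokA_loop, tokB_go]
  | succ n IH' =>
    intro suf hle i acc hdrop
    match suf with
    | [] => simp [PySem.List.enumerate_nil, tokA_loop, tokB_go]
    | t :: rest =>
      have hlen : ts.length = i + 1 + rest.length := by
        have := congrArg List.length hdrop
        simp at this; omega
      rw [PySem.List.enumerate_cons]
      by_cases hmem : t ∈ important_words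
      · match rest with
        | [] =>
          have hcond : ¬ ((i : Int) < (ts.length : Int) - 1) := by
            simp at hlen; omega
          simp [tokA_loop, PySem.List.enumerate_nil, tokB_go, hmem, hcond, mem_important_set]
        | nx :: rest' =>
          have hcond : (i : Int) < (ts.length : Int) - 1 := by
            simp [hlen]; omega
          have hget : PySem.List.pyGet? ts ((i : Int) + 1) = some nx := by
            have hdr : ts.drop (i + 1) = nx :: rest' := by
              rw [← List.drop_drop]; simp [hdrop]
            have h1 : ts[i + 1]? = some nx := by
              have h0 : (ts.drop (i + 1))[0]? = some nx := by rw [hdr]; rfl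
              simpa [List.getElem?_drop] using h0
            have h2 := PySem.List.pyGet?_natCast (xs := ts) (n := i + 1)
            rw [h1] at h2
            simpa using h2
          have hdrop' : ts.drop (i + 2) = rest' := by
            rw [show i + 2 = (i + 1) + 1 by ring, ← List.drop_drop, ← List.drop_drop]
            simp [hdrop]
          have hIH := IH' rest' (by simp at hle ⊢; omega) (i + 2) (acc ++ [t ++ "_" ++ nx]) hdrop'
          simp only [tokA_loop, PySem.List.enumerate_cons, hget, hmem, hcond, and_self,
            if_true, Bool.false_eq_true, if_false, Option.getD_some]
          rw [show ((i : Int) + 1 + 1) = ((i + 2 : Nat) : Int) by push_cast; ring]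
          rw [hIH]
          simp [tokB_go, mem_important_set, hmem]
      · have hdrop' : ts.drop (i + 1) = rest := by
          rw [← List.drop_drop]; simp [hdrop]
        have hIH := IH' rest (by simp at hle ⊢; omega) (i + 1) (acc ++ [t]) hdrop'
        have hnot : ¬ (t ∈ important_words ∧ (i : Int) < (ts.length : Int) - 1) := by tauto
        simp only [tokA_loop, Bool.false_eq_true, if_false, if_neg hnot]
        rw [show ((i : Int) + 1) = ((i + 1 : Nat) : Int) by push_cast; ring]
        rw [hIH, tokB_go_cons_not t rest (by simp [mem_important_set, hmem])]
        simp

-- ===== VERDICT (by name: the statement is the Claim_ definition above) =====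
theorem tokenization_with_context_spec : Claim_equal_tokenization_with_context := by
  intro text _
  unfold Spec_tokenization_with_context tokenization_with_context tokenization_with_context_alt
  exact tokA_loop_eq_aux (PySem.Str.split₀ text) (PySem.Str.split₀ text).length (PySem.Str.split₀ text) le_rfl 0 [] (by simp)
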